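-- pv_equiv track=rewrite | github.com/mackoo13/popsicle | lore/lore_proc_utils.py | malloc
-- ===== SOURCE A (Python) =====
-- def malloc(name, dtype, sizes, dim):
--     """
--     Generates C code for array memory allocation and random initialization.
--     For multidimensional arrays, the function is called recursively for each dimension.
--     A constant of 2 is added to the size for safety.
--
--     Example: malloc('A', 'int', ['N+42'], 0) -> A = malloc((N+42+2)*sizeof(int));
--     :param name: Array name
--     :param dtype: Array data type
--     :param sizes: List of dimensions sizes (as strings)
--     :param dim: Index of currently processed dimension
--     :return: C code (as string)
--     """
--     size = sizes[dim]
--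
--     indices = ['i_' + str(n) for n in range(dim + 1)]
--     indices_in_brackets = ['[' + i + ']' for i in indices]
--     i = indices[-1]
--
--     inds = ''.join(indices_in_brackets[:-1])
--     ptr_asterisks = '*'*(len(sizes) - dim - 1)
--     res = '\t' * dim
--     res += '%s%s = malloc((%s+2) * sizeof(%s%s));\n' % \
--            (name, inds, size, dtype, ptr_asterisks)
--     res += '\t' * dim
--     res += 'for(int %s=0; %s<%s+2; ++%s) {\n' % \
--            (i, i, size, i)
--
--     if dim < len(sizes) - 1:
--         res += malloc(name, dtype, sizes, dim + 1)
--     else: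
--         inds = ''.join(indices_in_brackets)
--         res += '\t' * (dim + 1)
--         res += '%s%s = (%s)rand();\n' % (name, inds, dtype)
--
--     res += '\t' * dim + '}\n'
--
--     return res
-- ===== SOURCE B (Python) =====
-- def malloc(name, dtype, sizes, dim):
--     """Iterative re-implementation: a do-while walks the levels emitting the
--     open (malloc + for) lines, then the innermost rand() line is appended,
--     then a countdown loop emits the closing braces."""
--     n = len(sizes)
--     out = []
--     d = dim
--     while True:
--         size = sizes[d]
--         ind = ''.join('[' + 'i_' + str(k) + ']' for k in range(d))
--         out.append('\t' * d + name + ind + ' = malloc((' + size +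
--                    '+2) * sizeof(' + dtype + '*' * (n - d - 1) + '));\n')
--         i = 'i_' + str(d)
--         out.append('\t' * d + 'for(int ' + i + '=0; ' + i + '<' + size + '+2; ++' + i + ') {\n')
--         if d == n - 1:
--             break
--         d += 1
--     out.append('\t' * n + name +
--                ''.join('[' + 'i_' + str(k) + ']' for k in range(n)) +
--                ' = (' + dtype + ')rand();\n')
--     for e in range(d, dim - 1, -1):
--         out.append('\t' * e + '}\n')
--     return ''.join(out)
-- ===== Notes on version B (the rewrite author's own statement) =====
-- stated objective: alternative
-- what changed: Replaces the per-dimension recursion with an explicit do-while loop that appends the open (malloc + for) lines level by level into a buffer, then the innermost rand() line, then a countdown loop emitting the closing braces.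
import Mathlib
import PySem

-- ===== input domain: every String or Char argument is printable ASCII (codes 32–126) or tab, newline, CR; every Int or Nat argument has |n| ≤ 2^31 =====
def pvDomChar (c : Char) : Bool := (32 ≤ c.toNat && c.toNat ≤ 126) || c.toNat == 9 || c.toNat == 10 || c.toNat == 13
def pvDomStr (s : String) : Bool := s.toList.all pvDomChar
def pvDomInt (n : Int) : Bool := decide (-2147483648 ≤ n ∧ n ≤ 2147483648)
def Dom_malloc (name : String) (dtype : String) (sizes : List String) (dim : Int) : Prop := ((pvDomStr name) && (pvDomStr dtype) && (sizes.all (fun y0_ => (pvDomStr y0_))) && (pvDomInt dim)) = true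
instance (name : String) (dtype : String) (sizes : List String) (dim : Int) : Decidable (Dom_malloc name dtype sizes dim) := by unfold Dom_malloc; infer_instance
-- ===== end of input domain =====

-- B rewrites the per-dimension recursion as one iterative pass (open lines, rand line, closing braces); same output, different decomposition.

-- shared tiny helpers: '\t'*d and '*'*k (Python string repetition, nonnegative count)
def tabs : Nat → String
  | 0 => ""
  | d+1 => tabs d ++ "\t"

def stars : Nat → String
  | 0 => ""
  | k+1 => stars k ++ "*"

-- ===== PORT A =====
-- Recursion on the dimension index, as in the Python; Pre_ guarantees 0 ≤ dim < len(sizes),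
-- so sizes[dim] is in range (Python raises IndexError outside; `getD ""` is never hit inside Pre_)
-- and the indices list is nonempty (`getD ""` for indices[-1] is never hit either).
def mallocRec (name : String) (dtype : String) (sizes : List String) (dim : Nat) : String :=
  let size := sizes.getD dim ""
  let indices := (List.range (dim + 1)).map (fun n => "i_" ++ toString n)
  let indicesInBrackets := indices.map (fun i => "[" ++ i ++ "]")
  let i := (indices.getLast?).getD ""
  let inds := String.join indicesInBrackets.dropLast
  let ptrAsterisks := stars (sizes.length - dim - 1)
  let res := tabs dim
  let res := res ++ name ++ inds ++ " = malloc((" ++ size ++ "+2) * sizeof(" ++ dtype ++ ptrAsterisks ++ "));\n"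
  let res := res ++ tabs dim
  let res := res ++ "for(int " ++ i ++ "=0; " ++ i ++ "<" ++ size ++ "+2; ++" ++ i ++ ") {\n"
  let res :=
    if dim < sizes.length - 1 then
      res ++ mallocRec name dtype sizes (dim + 1)
    else
      res ++ tabs (dim + 1) ++ name ++ String.join indicesInBrackets ++ " = (" ++ dtype ++ ")rand();\n"
  res ++ tabs dim ++ "}\n"
termination_by sizes.length - dim
decreasing_by omega

def malloc (name : String) (dtype : String) (sizes : List String) (dim : Int) : String :=
  mallocRec name dtype sizes dim.toNat

-- ===== PORT B =====
-- '[' + 'i_' + str(k) + ']'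
def brk (k : Nat) : String := "[" ++ ("i_" ++ toString k) ++ "]"

-- the do-while: emit the two open lines for level d, stop at the last level, carry the buffer.
-- sizes[d] is pyGet? (Python wrap-around; none = IndexError, where Python B raises — the branch
-- returns the buffer so the function is total, it is unreachable under Pre_).
-- '\t'*d / range(d) / '*'*(n-d-1) are empty for a negative count, matched by .toNat.
def altOpen (name : String) (dtype : String) (sizes : List String) (d : Int) (out : List String) : List String × Int :=
  match h : PySem.List.pyGet? sizes d with
  | none => (out, d)
  | some size =>
    let ind := String.join ((List.range d.toNat).map brk)
    let i := "i_" ++ toString d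
    let out := out ++
      [tabs d.toNat ++ name ++ ind ++ " = malloc((" ++ size ++ "+2) * sizeof(" ++ dtype ++ stars ((sizes.length : Int) - d - 1).toNat ++ "));\n",
       tabs d.toNat ++ "for(int " ++ i ++ "=0; " ++ i ++ "<" ++ size ++ "+2; ++" ++ i ++ ") {\n"]
    if d = (sizes.length : Int) - 1 then (out, d) else altOpen name dtype sizes (d + 1) out
termination_by ((sizes.length : Int) - d).toNat
decreasing_by
  have hin : PySem.Raise.InRange sizes.length d := by
    by_contra hc
    have hnone : PySem.List.pyGet? sizes d = none := by
      rw [PySem.List.pyGet?_eq_none_iff]; exact hc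
    rw [hnone] at h
    simp at h
  simp [PySem.Raise.InRange] at hin
  omega

def malloc_alt (name : String) (dtype : String) (sizes : List String) (dim : Int) : String :=
  let r := altOpen name dtype sizes dim []
  let out := r.1 ++
    [tabs sizes.length ++ name ++ String.join ((List.range sizes.length).map brk) ++ " = (" ++ dtype ++ ")rand();\n"]
  let out := out ++ (PySem.List.pyRange r.2 (dim - 1) (-1)).map (fun e => tabs e.toNat ++ "}\n")
  String.join out

-- ===== PRECONDITION & SPEC =====
-- Pre_ excludes exactly the inputs where Python A raises IndexError: dim < 0 (empty indices list,
-- indices[-1] raises) or dim ≥ len(sizes) (sizes[dim] raises).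
def Pre_malloc (name : String) (dtype : String) (sizes : List String) (dim : Int) : Prop :=
  0 ≤ dim ∧ dim < (sizes.length : Int)
instance (name : String) (dtype : String) (sizes : List String) (dim : Int) : Decidable (Pre_malloc name dtype sizes dim) := by unfold Pre_malloc; infer_instance

def pvWitness_malloc : String × String × List String × Int := ("A", "int", ["N+42", "M"], 0)

def Spec_malloc (name : String) (dtype : String) (sizes : List String) (dim : Int) (out : String) : Prop := out = malloc_alt name dtype sizes dim
instance (name : String) (dtype : String) (sizes : List String) (dim : Int) (out : String) : Decidable (Spec_malloc name dtype sizes dim out) := by unfold Spec_malloc; infer_instance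

-- ===== CLAIM (what is proved, stated in full; the proofs are below) =====
def Claim_equal_malloc : Prop := ∀ (name : String) (dtype : String) (sizes : List String) (dim : Int), Dom_malloc name dtype sizes dim → Pre_malloc name dtype sizes dim → Spec_malloc name dtype sizes dim (malloc name dtype sizes dim)

-- ===== LEMMAS AND PROOFS =====

theorem foldl_append_str (l : List String) : ∀ a : String, List.foldl (· ++ ·) a l = a ++ String.join l := by
  induction l with
  | nil => intro a; simp [String.join]
  | cons x xs ih =>
    intro a
    simp only [String.join, List.foldl_cons]
    rw [ih (a ++ x), ih ("" ++ x)]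
    simp [String.append_assoc]

theorem join_cons (a : String) (l : List String) : String.join (a :: l) = a ++ String.join l := by
  have h := foldl_append_str l ("" ++ a)
  simp only [String.join, List.foldl_cons]
  rw [h]
  simp [String.join]

theorem join_append (l m : List String) : String.join (l ++ m) = String.join l ++ String.join m := by
  induction l with
  | nil => simp [String.join]
  | cons x xs ih => simp only [List.cons_append, join_cons, ih, String.append_assoc]

theorem join_concat (l : List String) (a : String) : String.join (l ++ [a]) = String.join l ++ a := by
  simp [String.join, List.foldl_append]

theorem join_nil : String.join ([] : List String) = "" := rfl

theorem brk_dropLast (d : Nat) : ((List.range (d + 1)).map brk).dropLast = (List.range d).map brk := by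
  rw [List.range_succ, List.map_append]; simp

-- A's bracket pieces coincide with B's `brk`
theorem ibr_eq (d : Nat) :
    ((List.range d).map (fun n => "i_" ++ toString n)).map (fun i => "[" ++ i ++ "]")
      = (List.range d).map brk := by
  simp [List.map_map, brk, Function.comp]

theorem indices_last (d : Nat) :
    (((List.range (d + 1)).map (fun n => "i_" ++ toString n)).getLast?).getD ""
      = "i_" ++ toString d := by
  rw [List.range_succ, List.map_append]
  simp

-- the two open lines of level e, as strings (proof-side abbreviation for both ports' output)
def openPair (name : String) (dtype : String) (sizes : List String) (e : Int) : List String :=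
  [tabs e.toNat ++ name ++ String.join ((List.range e.toNat).map brk) ++ " = malloc(("
     ++ sizes.getD e.toNat "" ++ "+2) * sizeof(" ++ dtype ++ stars ((sizes.length : Int) - e - 1).toNat ++ "));\n",
   tabs e.toNat ++ "for(int " ++ ("i_" ++ toString e) ++ "=0; " ++ ("i_" ++ toString e) ++ "<"
     ++ sizes.getD e.toNat "" ++ "+2; ++" ++ ("i_" ++ toString e) ++ ") {\n"]

theorem altOpen_spec (name dtype : String) (sizes : List String) :
    ∀ k (d : Int) (out : List String), ((sizes.length : Int) - d).toNat = k → 0 ≤ d → d < (sizes.length : Int) →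
      altOpen name dtype sizes d out =
        (out ++ (PySem.List.pyRange d (sizes.length : Int) 1).flatMap (openPair name dtype sizes),
         (sizes.length : Int) - 1) := by
  intro k
  induction k with
  | zero => intro d out hk h0 hd; exfalso; omega
  | succ k ih =>
    intro d out hk h0 hd
    have hdt : ((d.toNat : Nat) : Int) = d := Int.toNat_of_nonneg h0
    have hlen : d.toNat < sizes.length := by omega
    have hget : PySem.List.pyGet? sizes d = some (sizes.getD d.toNat "") := by
      rw [PySem.List.pyGet?_eq_some_getElem (xs := sizes) (i := d) h0 hd]
      congr 1
      simp [List.getD_eq_getElem?_getD, List.getElem?_eq_getElem hlen]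
    have hcons : PySem.List.pyRange d (sizes.length : Int) 1
        = d :: PySem.List.pyRange (d + 1) (sizes.length : Int) 1 :=
      PySem.List.pyRange_one_cons hd
    rw [altOpen]
    split
    · rename_i heq
      rw [hget] at heq
      simp at heq
    · rename_i size heq
      rw [hget] at heq
      obtain rfl : size = sizes.getD d.toNat "" := (Option.some.inj heq).symm
      by_cases hend : d = (sizes.length : Int) - 1
      · have hnil : PySem.List.pyRange (d + 1) (sizes.length : Int) 1 = [] :=
          PySem.List.pyRange_one_eq_nil (by omega)
        rw [if_pos hend, hcons, hnil]
        simp [openPair, hend, List.flatMap_cons]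
      · have hd1 : d + 1 < (sizes.length : Int) := by omega
        have ihd := ih (d + 1) (out ++ openPair name dtype sizes d) (by omega) (by omega) hd1
        simp only [if_neg hend]
        rw [show (out ++
            [tabs d.toNat ++ name ++ String.join ((List.range d.toNat).map brk) ++ " = malloc(("
               ++ sizes.getD d.toNat "" ++ "+2) * sizeof(" ++ dtype ++ stars ((sizes.length : Int) - d - 1).toNat ++ "));\n",
             tabs d.toNat ++ "for(int " ++ ("i_" ++ toString d) ++ "=0; " ++ ("i_" ++ toString d) ++ "<"
               ++ sizes.getD d.toNat "" ++ "+2; ++" ++ ("i_" ++ toString d) ++ ") {\n"])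
            = out ++ openPair name dtype sizes d from rfl]
        rw [ihd, hcons]
        simp [List.flatMap_cons, List.append_assoc]

theorem main_lemma (name dtype : String) (sizes : List String) :
    ∀ k (d : Int), ((sizes.length : Int) - d).toNat = k → 0 ≤ d → d < (sizes.length : Int) →
      mallocRec name dtype sizes d.toNat =
        String.join ((PySem.List.pyRange d (sizes.length : Int) 1).flatMap (openPair name dtype sizes))
          ++ ((tabs sizes.length ++ name ++ String.join ((List.range sizes.length).map brk) ++ " = (" ++ dtype ++ ")rand();\n")
          ++ String.join (((PySem.List.pyRange d (sizes.length : Int) 1).reverse).map (fun e => tabs e.toNat ++ "}\n"))) := by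
  intro k
  induction k with
  | zero => intro d hk h0 hd; exfalso; omega
  | succ k ih =>
    intro d hk h0 hd
    have hdt : ((d.toNat : Nat) : Int) = d := Int.toNat_of_nonneg h0
    have hcons : PySem.List.pyRange d (sizes.length : Int) 1
        = d :: PySem.List.pyRange (d + 1) (sizes.length : Int) 1 :=
      PySem.List.pyRange_one_cons hd
    have hstr : toString d = toString d.toNat := by rw [← hdt]; rfl
    have hstars : ((sizes.length : Int) - d - 1).toNat = sizes.length - d.toNat - 1 := by omega
    rw [mallocRec]
    simp only [hcons, List.flatMap_cons, join_append, join_cons, List.reverse_cons,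
      List.map_append, List.map_cons, List.map_nil, indices_last, ibr_eq,
      brk_dropLast, openPair, join_nil]
    rw [hstr, hstars]
    by_cases hlt : d.toNat < sizes.length - 1
    · have hsucc : (d + 1).toNat = d.toNat + 1 := by omega
      have ihd := ih (d + 1) (by omega) (by omega) (by omega)
      rw [hsucc] at ihd
      simp only [if_pos hlt, ihd]
      simp [openPair, String.append_assoc]
    · have hnil : PySem.List.pyRange (d + 1) (sizes.length : Int) 1 = [] :=
        PySem.List.pyRange_one_eq_nil (by omega)
      have hd1 : d.toNat + 1 = sizes.length := by omega
      rw [hnil]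
      simp only [List.flatMap_nil, List.map_nil, List.reverse_nil, join_nil, if_neg hlt]
      rw [← hd1]
      simp only [List.range_succ, List.map_append, List.map_cons, List.map_nil, join_concat]
      simp [brk, String.append_assoc]

theorem malloc_spec : Claim_equal_malloc := by
  intro name dtype sizes dim _ hpre
  obtain ⟨h0, h1⟩ := hpre
  show malloc name dtype sizes dim = malloc_alt name dtype sizes dim
  unfold malloc malloc_alt
  rw [altOpen_spec name dtype sizes (((sizes.length : Int) - dim).toNat) dim [] rfl h0 h1]
  simp only [List.nil_append]
  rw [PySem.List.pyRange_neg_one_eq_reverse]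
  have : (sizes.length : Int) - 1 + 1 = (sizes.length : Int) := by omega
  rw [show dim - 1 + 1 = dim from by omega, this]
  simp only [join_append, join_cons, join_nil]
  rw [main_lemma name dtype sizes (((sizes.length : Int) - dim).toNat) dim rfl h0 h1]
  simp [String.append_assoc]
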